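-- pv_equiv track=rewrite | github.com/ai4cloudops/SecLLMHolmes | src/helper_functions.py | fix_edge_cases
-- ===== SOURCE A (Python) =====
-- def fix_edge_cases(text):
--     # Llama long same letter word 'string' edge case
--     max_length = 100
--     len_list = list(map(len, text.split()))
--     if len(len_list) and max(len_list) > max_length:
--         words = text.split()
--         truncated_words = [word[:max_length] if len(word) > max_length else word for word in words]
--         text = ' '.join(truncated_words)
--         return True, text
--     return False, text
-- ===== SOURCE B (Python) =====
-- def fix_edge_cases(text):
--     buf = []          # characters of the rebuilt (truncated, single-space-joined) text
--     k = 0             # length of the current word scanned so far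
--     changed = False
--     for c in text:
--         if c.isspace():
--             k = 0
--         else:
--             if k == 0 and buf:
--                 buf.append(' ')
--             k += 1
--             if k <= 100:
--                 buf.append(c)
--             else:
--                 changed = True
--     if changed:
--         return True, ''.join(buf)
--     return False, text
-- ===== Notes on version B (the rewrite author's own statement) =====
-- stated objective: alternative
-- what changed: B replaces A's split/length-list/max scan plus second split-and-truncate pass by a single character-level state machine that never builds a word list: it scans the text once, emitting truncated words and single-space separators into a buffer while a word-length counter sets the changed flag, returning the original text when the flag never fired.
import Mathlib
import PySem

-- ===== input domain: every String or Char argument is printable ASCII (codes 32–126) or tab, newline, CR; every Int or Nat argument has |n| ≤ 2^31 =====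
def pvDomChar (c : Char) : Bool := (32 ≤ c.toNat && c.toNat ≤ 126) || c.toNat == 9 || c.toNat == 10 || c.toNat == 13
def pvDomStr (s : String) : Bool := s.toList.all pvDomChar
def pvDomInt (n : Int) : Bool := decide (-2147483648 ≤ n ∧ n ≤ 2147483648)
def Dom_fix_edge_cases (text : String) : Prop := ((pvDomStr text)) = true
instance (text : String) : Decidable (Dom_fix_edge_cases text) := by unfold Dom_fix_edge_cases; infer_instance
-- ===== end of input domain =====

-- B replaces A's split/max/re-split/truncate pipeline by a single character-level
-- state machine that never builds a word list (objective: alternative).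

-- ===== PORT A =====
def fix_edge_cases (text : String) : Bool × String :=
  let maxLength : Int := 100
  let lenList : List Int := (PySem.Str.split₀ text).map PySem.Str.len
  if lenList.length ≠ 0 ∧ (PySem.List.max? lenList (fun x => x)).getD 0 > maxLength then
    let words := PySem.Str.split₀ text
    let truncatedWords := words.map (fun w =>
      if PySem.Str.len w > maxLength then PySem.Str.slice w none (some maxLength) else w)
    (true, PySem.Str.join " " truncatedWords)
  else
    (false, text)

-- ===== PORT B =====
-- one step of B's scan: state = (buf = chars of rebuilt text, k = current word length, changed)
def fecStep (st : List Char × Nat × Bool) (c : Char) : List Char × Nat × Bool :=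
  if PySem.Chars.isspace c then (st.1, 0, st.2.2)
  else
    let buf := if st.2.1 = 0 ∧ st.1 ≠ [] then st.1 ++ [' '] else st.1
    let k := st.2.1 + 1
    if k ≤ 100 then (buf ++ [c], k, st.2.2) else (buf, k, true)

def fix_edge_cases_alt (text : String) : Bool × String :=
  let st := text.toList.foldl fecStep ([], 0, false)
  if st.2.2 then (true, String.ofList st.1) else (false, text)

-- ===== PRECONDITION & SPEC =====
def Spec_fix_edge_cases (text : String) (out : Bool × String) : Prop := out = fix_edge_cases_alt text
instance (text : String) (out : Bool × String) : Decidable (Spec_fix_edge_cases text out) := by unfold Spec_fix_edge_cases; infer_instance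

-- ===== CLAIM (what is proved, stated in full; the proofs are below) =====
def Claim_equal_fix_edge_cases : Prop := ∀ (text : String), Dom_fix_edge_cases text → Spec_fix_edge_cases text (fix_edge_cases text)

-- ===== LEMMAS AND PROOFS =====

-- the abstract state B's scan is in when split₀.go is at (cur, acc)
def fecState (cur : List Char) (acc : List (List Char)) : List Char × Nat × Bool :=
  (PySem.Chars.join [' '] ((acc.reverse.map (List.take 100)) ++
      if cur = [] then [] else [cur.reverse.take 100]),
   cur.length,
   acc.any (fun w => decide (100 < w.length)) || decide (100 < cur.length))

theorem join_append_one (l : List (List Char)) (x : List Char) :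
    PySem.Chars.join [' '] (l ++ [x]) =
      PySem.Chars.join [' '] l ++ (if l = [] then [] else [' ']) ++ x := by
  induction l with
  | nil => simp [PySem.Chars.join_nil, PySem.Chars.join_singleton]
  | cons a t ih =>
    cases t with
    | nil => simp [PySem.Chars.join_singleton, PySem.Chars.join_cons_cons]
    | cons b t' =>
      rw [show (a :: b :: t') ++ [x] = a :: b :: (t' ++ [x]) by simp,
          PySem.Chars.join_cons_cons,
          show (b :: (t' ++ [x])) = (b :: t') ++ [x] by simp, ih,
          PySem.Chars.join_cons_cons]
      simp

theorem join_ne_nil (l : List (List Char)) (hl : l ≠ []) (h : ∀ w ∈ l, w ≠ []) :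
    PySem.Chars.join [' '] l ≠ [] := by
  cases l with
  | nil => exact absurd rfl hl
  | cons a t =>
    cases t with
    | nil => simpa [PySem.Chars.join_singleton] using h a (by simp)
    | cons b t' => simp [PySem.Chars.join_cons_cons]

-- B's scan over the remaining characters, started in the abstract state of (cur, acc),
-- lands on exactly the truncated-join and the any-too-long flag of split₀.go's result.
theorem fec_loop (cs : List Char) : ∀ (cur : List Char) (acc : List (List Char)),
    (∀ w ∈ acc, w ≠ []) →
    (List.foldl fecStep (fecState cur acc) cs).1
        = PySem.Chars.join [' '] ((PySem.Chars.split₀.go cs cur acc).map (List.take 100))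
    ∧ (List.foldl fecStep (fecState cur acc) cs).2.2
        = (PySem.Chars.split₀.go cs cur acc).any (fun w => decide (100 < w.length)) := by
  induction cs with
  | nil =>
    intro cur acc hacc
    by_cases hc : cur = []
    · subst hc
      simp [fecState, PySem.Chars.split₀.go, List.any_reverse]
    · simp [fecState, PySem.Chars.split₀.go, List.isEmpty_iff, hc, List.any_reverse,
        List.any_append, Bool.or_comm]
  | cons c rest ih =>
    intro cur acc hacc
    simp only [List.foldl_cons]
    by_cases hs : PySem.Chars.isspace c
    · by_cases hc : cur = []
      · subst hc
        have hstep : fecStep (fecState [] acc) c = fecState [] acc := by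
          simp [fecStep, hs, fecState]
        rw [hstep]
        have := ih [] acc hacc
        simpa [PySem.Chars.split₀.go, hs] using this
      · have hstep : fecStep (fecState cur acc) c = fecState [] (cur.reverse :: acc) := by
          simp [fecStep, hs, fecState, hc, List.any_cons, Bool.or_comm]
        rw [hstep]
        have hacc' : ∀ w ∈ cur.reverse :: acc, w ≠ [] := by
          intro w hw
          rcases List.mem_cons.mp hw with h | h
          · subst h; simpa using hc
          · exact hacc w h
        have := ih [] (cur.reverse :: acc) hacc'
        simpa [PySem.Chars.split₀.go, hs, List.isEmpty_iff, hc] using this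
    · by_cases hk : cur.length + 1 ≤ 100
      · have hstep : fecStep (fecState cur acc) c = fecState (c :: cur) acc := by
          by_cases hc : cur = []
          · subst hc
            by_cases ha : acc = []
            · subst ha
              simp [fecStep, hs, fecState, PySem.Chars.join_nil, PySem.Chars.join_singleton]
            · have hne : acc.reverse.map (List.take 100) ≠ [] := by simp [ha]
              have hwords : ∀ w ∈ acc.reverse.map (List.take 100), w ≠ [] := by
                intro w hw
                obtain ⟨u, hu, rfl⟩ := List.mem_map.mp hw
                have := hacc u (List.mem_reverse.mp hu)
                simpa [List.take_eq_nil_iff] using this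
              have hjoin := join_ne_nil _ hne hwords
              simp only [fecStep, fecState]
              rw [if_neg hs]
              simp [join_append_one]
              rw [List.map_reverse] at hjoin
              rw [if_neg hjoin, if_neg ha]
              simp
          · have h99 : cur.length ≤ 99 := by omega
            simp only [fecStep, fecState]
            rw [if_neg hs]
            rw [if_neg (by simp [hc] : ¬ (cur.length = 0 ∧ _ ≠ []))]
            rw [if_pos hk]
            have htake : cur.reverse.take 100 = cur.reverse := by
              apply List.take_of_length_le; simp; omega
            have htake' : (c :: cur).reverse.take 100 = cur.reverse ++ [c] := by
              rw [List.reverse_cons]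
              apply List.take_of_length_le; simp; omega
            simp only [if_neg hc, if_neg (by simp : ¬ ((c :: cur) = [])), htake, htake',
              List.length_cons, Prod.mk.injEq]
            refine ⟨?_, by trivial, ?_⟩
            · rw [join_append_one, join_append_one]
              simp
            · simp [show ¬ (100 < cur.length) from by omega,
                show ¬ (100 < cur.length + 1) from by omega]
        rw [hstep]
        have hgo : PySem.Chars.split₀.go (c :: rest) cur acc
            = PySem.Chars.split₀.go rest (c :: cur) acc := by
          rw [PySem.Chars.split₀.go.eq_def]; simp [hs]
        rw [hgo]
        exact ih (c :: cur) acc hacc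
      · have hc : cur ≠ [] := by intro h; subst h; simp at hk
        have hstep : fecStep (fecState cur acc) c = fecState (c :: cur) acc := by
          simp only [fecStep, fecState]
          rw [if_neg hs]
          rw [if_neg (by simp [hc] : ¬ (cur.length = 0 ∧ _ ≠ []))]
          rw [if_neg hk]
          have htake : (c :: cur).reverse.take 100 = cur.reverse.take 100 := by
            rw [List.reverse_cons, List.take_append_of_le_length (by simp; omega)]
          simp only [if_neg hc, if_neg (by simp : ¬ ((c :: cur) = [])), htake, List.length_cons,
            Prod.mk.injEq]
          refine ⟨by trivial, by trivial, ?_⟩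
          simp [show 100 < cur.length + 1 from by omega]
        rw [hstep]
        have hgo : PySem.Chars.split₀.go (c :: rest) cur acc
            = PySem.Chars.split₀.go rest (c :: cur) acc := by
          rw [PySem.Chars.split₀.go.eq_def]; simp [hs]
        rw [hgo]
        exact ih (c :: cur) acc hacc

-- specialisation to the whole text
theorem fec_scan (text : String) :
    (text.toList.foldl fecStep ([], 0, false)).1
        = PySem.Chars.join [' '] ((PySem.Chars.split₀ text.toList).map (List.take 100))
    ∧ (text.toList.foldl fecStep ([], 0, false)).2.2
        = (PySem.Chars.split₀ text.toList).any (fun w => decide (100 < w.length)) := by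
  have h0 : fecState [] [] = (([] : List Char), 0, false) := by
    simp [fecState, PySem.Chars.join_nil]
  have := fec_loop text.toList [] [] (by simp)
  rw [h0] at this
  exact this

-- A's guard fires exactly when some word is longer than 100 characters
theorem guard_iff (text : String) :
    (((PySem.Str.split₀ text).map PySem.Str.len).length ≠ 0 ∧
      (PySem.List.max? ((PySem.Str.split₀ text).map PySem.Str.len) (fun x => x)).getD 0 > 100)
    ↔ ∃ w ∈ PySem.Str.split₀ text, 100 < (PySem.Str.len w) := by
  constructor
  · rintro ⟨hne, hmax⟩
    obtain ⟨m, hm⟩ : ∃ m, PySem.List.max? ((PySem.Str.split₀ text).map PySem.Str.len) (fun x => x) = some m := by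
      cases h : PySem.List.max? ((PySem.Str.split₀ text).map PySem.Str.len) (fun x => x) with
      | none =>
        rw [PySem.List.max?_eq_none_iff] at h
        rw [h] at hne; simp at hne
      | some m => exact ⟨m, rfl⟩
    obtain ⟨w, hw, hwm⟩ := List.mem_map.mp (PySem.List.max?_mem hm)
    rw [hm] at hmax
    simp only [Option.getD_some] at hmax
    exact ⟨w, hw, by rw [hwm]; exact hmax⟩
  · rintro ⟨w, hw, hlen⟩
    have hmem : PySem.Str.len w ∈ (PySem.Str.split₀ text).map PySem.Str.len := List.mem_map_of_mem hw
    obtain ⟨m, hm⟩ : ∃ m, PySem.List.max? ((PySem.Str.split₀ text).map PySem.Str.len) (fun x => x) = some m := by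
      cases h : PySem.List.max? ((PySem.Str.split₀ text).map PySem.Str.len) (fun x => x) with
      | none =>
        rw [PySem.List.max?_eq_none_iff] at h
        rw [h] at hmem; simp at hmem
      | some m => exact ⟨m, rfl⟩
    have hle := PySem.List.max?_isMax hm _ hmem
    refine ⟨by intro h; rw [List.length_eq_zero_iff] at h; rw [h] at hmem; simp at hmem, ?_⟩
    rw [hm]; simp only [Option.getD_some]
    simp only at hle
    omega

-- the String-level guard matches B's char-level flag
theorem guard_eq_flag (text : String) :
    (∃ w ∈ PySem.Str.split₀ text, 100 < (PySem.Str.len w))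
    ↔ (PySem.Chars.split₀ text.toList).any (fun w => decide (100 < w.length)) = true := by
  rw [List.any_eq_true]
  rw [← PySem.Str.split₀_map_toList]
  constructor
  · rintro ⟨w, hw, h⟩
    exact ⟨w.toList, List.mem_map_of_mem hw, by simpa [PySem.Str.len_eq] using h⟩
  · rintro ⟨u, hu, h⟩
    obtain ⟨w, hw, rfl⟩ := List.mem_map.mp hu
    exact ⟨w, hw, by simpa [PySem.Str.len_eq] using h⟩

-- A's truncated-and-joined string, seen at the character level
theorem a_join_eq (text : String) :
    (PySem.Str.join " " ((PySem.Str.split₀ text).map (fun w =>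
        if PySem.Str.len w > (100:Int) then PySem.Str.slice w none (some 100) else w))).toList
    = PySem.Chars.join [' '] ((PySem.Chars.split₀ text.toList).map (List.take 100)) := by
  rw [PySem.Str.toList_join]
  have hsep : (" " : String).toList = [' '] := rfl
  rw [hsep, ← PySem.Str.split₀_map_toList, List.map_map, List.map_map]
  congr 1
  refine List.map_congr_left (fun w _ => ?_)
  simp only [Function.comp]
  by_cases h : PySem.Str.len w > (100:Int)
  · rw [if_pos h]
    simp only [PySem.Str.toList_slice, PySem.Chars.slice_eq_listSlice]
    simpa using PySem.List.slice_to w.toList (b := (100:Int)) (by norm_num)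
  · rw [if_neg h]
    have : w.toList.length ≤ 100 := by rw [PySem.Str.len_eq] at h; omega
    exact (List.take_of_length_le this).symm

-- ===== VERDICT (by name: the statement is the Claim_ definition above) =====
theorem fix_edge_cases_spec : Claim_equal_fix_edge_cases := by
  intro text _
  unfold Spec_fix_edge_cases
  obtain ⟨hbuf, hflag⟩ := fec_scan text
  simp only [fix_edge_cases, fix_edge_cases_alt]
  by_cases hg : ∃ w ∈ PySem.Str.split₀ text, 100 < (PySem.Str.len w)
  · rw [if_pos ((guard_iff text).mpr hg)]
    rw [hflag, if_pos ((guard_eq_flag text).mp hg)]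
    refine Prod.ext rfl ?_
    apply String.toList_inj.mp
    rw [a_join_eq text]
    rw [hbuf, String.toList_ofList]
  · rw [if_neg (by rw [guard_iff]; exact hg)]
    rw [hflag, if_neg (by rw [← guard_eq_flag]; simpa using hg)]
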